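-- pv_equiv track=rewrite | github.com/Vagacoder/Codesignal | python/Arcade/Core/C28Lineup.py | lineUp1
-- ===== SOURCE A (Python) =====
-- def lineUp1(commands):
--     n = len(commands)
--     count = 0
--     sameDirection = True
--     for i in range(n):
--         c = commands[i]
--         if c == 'L' or c == 'R':
--             sameDirection =  not sameDirection
--         if sameDirection:
--             count += 1
--
--     return count
-- ===== SOURCE B (Python) =====
-- def lineUp1(commands):
--     # stage 1: split the command list into segments, each turn command ('L'/'R')
--     # starting a fresh (possibly empty) segment after it
--     segs = [[]]
--     for c in commands:
--         if c == 'L' or c == 'R':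
--             segs.append([])
--         else:
--             segs[-1].append(c)
--     # stage 2: elements of even-indexed segments face the original direction;
--     # of the turn commands themselves, every second one (2nd, 4th, ...) does too
--     turns = len(segs) - 1
--     return sum(len(s) for k, s in enumerate(segs) if k % 2 == 0) + turns // 2
-- ===== Notes on version B (the rewrite author's own statement) =====
-- stated objective: alternative
-- what changed: Instead of a single pass toggling a boolean and counting, B splits the command list into segments delimited by turn commands and computes the answer as the total length of even-indexed segments plus half the number of turn commands.
import Mathlib
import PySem

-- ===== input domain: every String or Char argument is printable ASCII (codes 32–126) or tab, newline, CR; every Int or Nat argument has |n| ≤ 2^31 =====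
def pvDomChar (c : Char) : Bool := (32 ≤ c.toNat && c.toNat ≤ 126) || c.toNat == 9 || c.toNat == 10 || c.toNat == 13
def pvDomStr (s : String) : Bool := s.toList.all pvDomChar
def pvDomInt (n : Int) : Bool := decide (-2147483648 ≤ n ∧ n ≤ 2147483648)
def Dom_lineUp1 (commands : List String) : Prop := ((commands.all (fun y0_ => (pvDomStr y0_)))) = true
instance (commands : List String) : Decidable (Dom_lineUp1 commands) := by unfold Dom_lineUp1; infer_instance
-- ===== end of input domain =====

-- B replaces A's single-pass boolean-toggle counter by a segment decomposition: split the
-- list at turn commands, then sum even-indexed segment lengths plus turns // 2.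
-- Objective: alternative (same O(n) cost, different algorithmic decomposition).

-- ===== PORT A =====
-- A's loop over range(n) indexing commands[i] visits the elements in order; ported as a fold
-- over the list carrying (count, sameDirection); the loop body is the helper aStep.
def aStep (acc : Int × Bool) (c : String) : Int × Bool :=
  let same := if c = "L" ∨ c = "R" then !acc.2 else acc.2
  (if same then acc.1 + 1 else acc.1, same)

def lineUp1 (commands : List String) : Int :=
  (commands.foldl aStep (0, true)).1

-- ===== PORT B =====
-- stage-1 loop body: 'segs.append([])' → segs ++ [[]]; 'segs[-1].append(c)' →
-- replace the last element (segs is never empty, so getLastD's default [] is never used).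
def bStep (segs : List (List String)) (c : String) : List (List String) :=
  if c = "L" ∨ c = "R" then segs ++ [[]]
  else segs.dropLast ++ [segs.getLastD [] ++ [c]]

def lineUp1_alt (commands : List String) : Int :=
  let segs := commands.foldl bStep [[]]
  let turns : Int := (segs.length : Int) - 1
  (((PySem.List.enumerate segs 0).filter (fun p => PySem.Int.mod p.1 2 == 0)).map
      (fun p => (p.2.length : Int))).sum
    + PySem.Int.floordiv turns 2

-- ===== PRECONDITION & SPEC =====
def Spec_lineUp1 (commands : List String) (out : Int) : Prop := out = lineUp1_alt commands
instance (commands : List String) (out : Int) : Decidable (Spec_lineUp1 commands out) := by unfold Spec_lineUp1; infer_instance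

-- ===== CLAIM (what is proved, stated in full; the proofs are below) =====
def Claim_equal_lineUp1 : Prop := ∀ (commands : List String), Dom_lineUp1 commands → Spec_lineUp1 commands (lineUp1 commands)

-- ===== LEMMAS AND PROOFS =====

-- proof-only: the segment decomposition as a structural recursion
def splitSegs : List String → List (List String)
  | [] => [[]]
  | c :: r =>
      if c = "L" ∨ c = "R" then [] :: splitSegs r
      else
        match splitSegs r with
        | s :: ss => (c :: s) :: ss
        | [] => [[c]]

theorem splitSegs_ne_nil (cs : List String) : splitSegs cs ≠ [] := by
  cases cs with
  | nil => simp [splitSegs]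
  | cons c r =>
      simp only [splitSegs]
      split
      · simp
      · cases h : splitSegs r <;> simp

-- prepend l to the head segment
def consH (l : List String) : List (List String) → List (List String)
  | s :: ss => (l ++ s) :: ss
  | [] => [l]

theorem consH_nil (ls : List (List String)) (h : ls ≠ []) : consH [] ls = ls := by
  cases ls with
  | nil => exact absurd rfl h
  | cons s ss => simp [consH]

theorem bfold_eq (cs : List String) : ∀ (pre : List (List String)) (lst : List String),
    cs.foldl bStep (pre ++ [lst]) = pre ++ consH lst (splitSegs cs) := by
  induction cs with
  | nil => intro pre lst; simp [splitSegs, consH]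
  | cons c r ih =>
      intro pre lst
      rw [List.foldl_cons]
      by_cases h : c = "L" ∨ c = "R"
      · have hs : bStep (pre ++ [lst]) c = (pre ++ [lst]) ++ [[]] := by simp [bStep, h]
        rw [hs, ih (pre ++ [lst]) [], consH_nil _ (splitSegs_ne_nil r)]
        simp [splitSegs, h, consH]
      · have hs : bStep (pre ++ [lst]) c = pre ++ [lst ++ [c]] := by
          simp [bStep, h]
        rw [hs, ih pre (lst ++ [c])]
        cases hr : splitSegs r with
        | nil => exact absurd hr (splitSegs_ne_nil r)
        | cons s ss => simp [splitSegs, h, hr, consH]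

theorem bfold0 (cs : List String) : cs.foldl bStep [[]] = splitSegs cs := by
  have := bfold_eq cs [] []
  simpa [consH_nil _ (splitSegs_ne_nil cs)] using this

-- A's running count as a structural function of the state
def g : Bool → List String → Int
  | _, [] => 0
  | b, c :: r =>
      let b' := if c = "L" ∨ c = "R" then !b else b
      (if b' then 1 else 0) + g b' r

theorem afold_eq (cs : List String) : ∀ (k : Int) (b : Bool),
    (cs.foldl aStep (k, b)).1 = k + g b cs := by
  induction cs with
  | nil => intro k b; simp [g]
  | cons c r ih =>
      intro k b
      rw [List.foldl_cons]
      by_cases h : c = "L" ∨ c = "R" <;> cases b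
      · have hs : aStep (k, false) c = (k + 1, true) := by simp [aStep, h]
        rw [hs, ih]
        simp [g, h]; ring
      · have hs : aStep (k, true) c = (k, false) := by simp [aStep, h]
        rw [hs, ih]
        simp [g, h]
      · have hs : aStep (k, false) c = (k, false) := by simp [aStep, h]
        rw [hs, ih]
        simp [g, h]
      · have hs : aStep (k, true) c = (k + 1, true) := by simp [aStep, h]
        rw [hs, ih]
        simp [g, h]; ring

-- sum of segment lengths at even (true) / odd (false) positions
def sumP : Bool → List (List String) → Int
  | _, [] => 0
  | true, s :: ss => (s.length : Int) + sumP false ss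
  | false, _ :: ss => sumP true ss

theorem g_eq_sumP (cs : List String) :
    g true cs = sumP true (splitSegs cs) + (((splitSegs cs).length - 1) / 2 : ℕ)
    ∧ g false cs = sumP false (splitSegs cs) + ((splitSegs cs).length / 2 : ℕ) := by
  induction cs with
  | nil => simp [g, splitSegs, sumP]
  | cons c r ih =>
      obtain ⟨ih1, ih2⟩ := ih
      have hlen : 1 ≤ (splitSegs r).length := by
        cases hs : splitSegs r with
        | nil => exact absurd hs (splitSegs_ne_nil r)
        | cons s ss => simp
      by_cases h : c = "L" ∨ c = "R"
      · constructor
        · simp only [g, splitSegs, h, if_pos, Bool.not_true, Bool.false_eq_true, if_false, sumP]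
          rw [ih2]
          simp only [List.length_cons]
          norm_num
        · simp only [g, splitSegs, h, if_pos, Bool.not_false, sumP]
          rw [ih1]
          simp only [List.length_cons]
          have : ((splitSegs r).length + 1) / 2 = ((splitSegs r).length - 1) / 2 + 1 := by omega
          rw [this]
          push_cast
          ring
      · cases hs : splitSegs r with
        | nil => exact absurd hs (splitSegs_ne_nil r)
        | cons s ss =>
          constructor
          · simp only [g, splitSegs, h, if_false, sumP, hs]
            rw [ih1, hs]
            simp only [sumP, List.length_cons]
            push_cast
            ring
          · simp only [g, splitSegs, h, if_false, Bool.false_eq_true, sumP, hs]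
            rw [ih2, hs]
            simp [sumP]

-- B's enumerate/filter/map/sum pass computes sumP, for any nonnegative starting index
theorem enumSum_eq (segs : List (List String)) : ∀ (k : Int), 0 ≤ k →
    (((PySem.List.enumerate segs k).filter (fun p => PySem.Int.mod p.1 2 == 0)).map
        (fun p => (p.2.length : Int))).sum
    = sumP (PySem.Int.mod k 2 == 0) segs := by
  induction segs with
  | nil =>
      intro k _
      cases h : (PySem.Int.mod k 2 == 0) <;>
        simp [PySem.List.enumerate_nil, sumP]
  | cons s ss ih =>
      intro k hk
      rw [PySem.List.enumerate_cons, List.filter_cons]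
      have hm : PySem.Int.mod k 2 = k % 2 := PySem.Int.mod_eq_emod_of_pos (by omega)
      have hm1 : PySem.Int.mod (k + 1) 2 = (k + 1) % 2 := PySem.Int.mod_eq_emod_of_pos (by omega)
      by_cases he : k % 2 = 0
      · have t1 : (PySem.Int.mod k 2 == 0) = true := by rw [hm]; simp [he]
        have t2 : (PySem.Int.mod (k + 1) 2 == 0) = false := by
          rw [hm1]; simp only [beq_eq_false_iff_ne, ne_eq]; omega
        rw [t1]
        simp only [if_true, List.map_cons, List.sum_cons, ih (k + 1) (by omega), t2, sumP]
      · have t1 : (PySem.Int.mod k 2 == 0) = false := by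
          rw [hm]; simp only [beq_eq_false_iff_ne, ne_eq]; omega
        have t2 : (PySem.Int.mod (k + 1) 2 == 0) = true := by
          rw [hm1]; simp only [beq_iff_eq]; omega
        rw [t1]
        simp only [Bool.false_eq_true, if_false, ih (k + 1) (by omega), t2, sumP]

-- ===== VERDICT (by name: the statement is the Claim_ definition above) =====
theorem lineUp1_spec : Claim_equal_lineUp1 := by
  intro commands _
  show lineUp1 commands = lineUp1_alt commands
  simp only [lineUp1, lineUp1_alt, bfold0]
  rw [afold_eq commands 0 true, enumSum_eq (splitSegs commands) 0 le_rfl]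
  have h0 : (PySem.Int.mod (0 : Int) 2 == 0) = true := by decide
  rw [h0]
  have hlen : 1 ≤ (splitSegs commands).length := by
    cases hs : splitSegs commands with
    | nil => exact absurd hs (splitSegs_ne_nil commands)
    | cons s ss => simp
  have hfd : PySem.Int.floordiv (((splitSegs commands).length : Int) - 1) 2
      = ((((splitSegs commands).length - 1) / 2 : ℕ) : Int) := by
    rw [PySem.Int.floordiv_eq_ediv_of_pos (by omega)]
    omega
  rw [hfd]
  have := (g_eq_sumP commands).1
  omega
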